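-- pv_equiv track=rewrite | github.com/luissimaoaf/quantipy | quantipy/utils.py | compute_drawdown_length
-- ===== SOURCE A (Python) =====
-- def compute_drawdown_length(dd):
--
--     drawdown_lengths = []
--     length = 0
--     for i in range(len(dd)):
--         if dd[i] < 0:
--             length +=1
--         elif length > 0:
--             drawdown_lengths.append(length)
--             length = 0
--
--     if drawdown_lengths == [] and length > 0:
--         drawdown_lengths = [length]
--     return drawdown_lengths
-- ===== SOURCE B (Python) =====
-- from itertools import groupby
--
--
-- def compute_drawdown_length(dd):
--     # All negative-run lengths in one shot, then select.
--     runs = [sum(1 for _ in g) for neg, g in groupby(dd, key=lambda x: x < 0) if neg]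
--     if not runs:
--         return []
--     if dd[-1] < 0:
--         completed = runs[:-1]
--         return completed if completed else [runs[-1]]
--     return runs
-- ===== Notes on version B (the rewrite author's own statement) =====
-- stated objective: alternative
-- what changed: B builds the full list of negative-run lengths with itertools.groupby in one shot and then selects (drop the trailing run unless it is the only one) instead of A's single counter-driven loop that appends at run boundaries and patches the result afterwards.
import Mathlib
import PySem

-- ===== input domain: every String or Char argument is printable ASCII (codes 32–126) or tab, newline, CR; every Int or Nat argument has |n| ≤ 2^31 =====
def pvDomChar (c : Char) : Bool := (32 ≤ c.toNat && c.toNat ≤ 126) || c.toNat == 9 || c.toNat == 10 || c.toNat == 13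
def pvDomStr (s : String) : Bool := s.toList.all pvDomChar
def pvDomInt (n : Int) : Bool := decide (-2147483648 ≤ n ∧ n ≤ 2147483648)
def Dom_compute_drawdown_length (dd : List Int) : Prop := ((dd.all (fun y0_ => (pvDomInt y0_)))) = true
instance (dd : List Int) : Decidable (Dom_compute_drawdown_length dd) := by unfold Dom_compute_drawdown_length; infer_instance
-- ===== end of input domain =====

-- B rebuilds the result from the full list of negative-run lengths (groupby style) instead of A's
-- counter loop with appends at run boundaries; same cost, different decomposition ("alternative").

-- ===== PORT A =====
-- A iterates dd in index order updating (drawdown_lengths, length); ported as a foldl over dd.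
def compute_drawdown_length (dd : List Int) : List Int :=
  let st := dd.foldl
    (fun (st : List Int × Int) x =>
      if x < 0 then (st.1, st.2 + 1)
      else if st.2 > 0 then (st.1 ++ [st.2], 0) else st)
    ([], 0)
  if st.1 = [] ∧ st.2 > 0 then [st.2] else st.1

-- ===== PORT B =====
-- Run lengths of consecutive negatives (itertools.groupby filtered to the negative groups).
def negRuns (dd : List Int) (cur : Int) : List Int :=
  match dd with
  | [] => if cur > 0 then [cur] else []
  | x :: xs =>
    if x < 0 then negRuns xs (cur + 1)
    else if cur > 0 then cur :: negRuns xs 0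
    else negRuns xs 0

def compute_drawdown_length_alt (dd : List Int) : List Int :=
  let runs := negRuns dd 0
  if runs = [] then []
  else
    match PySem.List.pyGet? dd (-1) with   -- dd[-1]; runs ≠ [] forces dd ≠ []
    | none => runs
    | some v =>
      if v < 0 then
        let completed := runs.dropLast       -- runs[:-1]
        if completed = [] then [runs.getLastD 0] else completed   -- runs[-1]; runs nonempty here
      else runs

-- ===== PRECONDITION & SPEC =====
def Spec_compute_drawdown_length (dd : List Int) (out : List Int) : Prop := out = compute_drawdown_length_alt dd
instance (dd : List Int) (out : List Int) : Decidable (Spec_compute_drawdown_length dd out) := by unfold Spec_compute_drawdown_length; infer_instance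

-- ===== CLAIM (what is proved, stated in full; the proofs are below) =====
def Claim_equal_compute_drawdown_length : Prop := ∀ (dd : List Int), Dom_compute_drawdown_length dd → Spec_compute_drawdown_length dd (compute_drawdown_length dd)

-- ===== LEMMAS AND PROOFS =====

-- spec of A's loop: completed runs (prefix) and the pending trailing counter
def runsSplit (dd : List Int) (cur : Int) : List Int × Int :=
  match dd with
  | [] => ([], cur)
  | x :: xs =>
    if x < 0 then runsSplit xs (cur + 1)
    else if cur > 0 then ((runsSplit xs 0).1.cons cur, (runsSplit xs 0).2)
    else runsSplit xs 0

theorem foldl_runsSplit (dd : List Int) : ∀ (acc : List Int) (cur : Int), 0 ≤ cur →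
    dd.foldl
      (fun (st : List Int × Int) x =>
        if x < 0 then (st.1, st.2 + 1)
        else if st.2 > 0 then (st.1 ++ [st.2], 0) else st)
      (acc, cur)
      = (acc ++ (runsSplit dd cur).1, (runsSplit dd cur).2) := by
  induction dd with
  | nil => simp [runsSplit]
  | cons x xs ih =>
    intro acc cur hcur
    simp only [List.foldl_cons, runsSplit]
    by_cases hx : x < 0
    · rw [if_pos hx, if_pos hx]
      exact ih acc (cur + 1) (by omega)
    · by_cases hc : cur > 0
      · rw [if_neg hx, if_neg hx, if_pos hc, if_pos hc]
        rw [ih (acc ++ [cur]) 0 (by omega)]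
        simp
      · have h0 : cur = 0 := by omega
        subst h0
        rw [if_neg hx, if_neg hx, if_neg hc, if_neg hc]
        exact ih acc 0 (by omega)


theorem negRuns_eq (dd : List Int) : ∀ cur : Int,
    negRuns dd cur = (runsSplit dd cur).1 ++ (if (runsSplit dd cur).2 > 0 then [(runsSplit dd cur).2] else []) := by
  induction dd with
  | nil => intro cur; simp [negRuns, runsSplit]
  | cons x xs ih =>
    intro cur
    simp only [negRuns, runsSplit]
    by_cases hx : x < 0
    · simp [hx, ih]
    · by_cases hc : cur > 0
      · simp [hx, hc, ih]
      · simp [hx, hc, ih]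

theorem runsSplit_snd_pos (dd : List Int) : ∀ cur : Int, 0 ≤ cur →
    ((runsSplit dd cur).2 > 0 ↔
      (match dd.getLast? with
       | some v => v < 0
       | none => cur > 0)) := by
  induction dd with
  | nil => intro cur _; simp [runsSplit]
  | cons x xs ih =>
    intro cur hcur
    cases xs with
    | nil =>
      by_cases hx : x < 0
      · simp [runsSplit, hx]
        omega
      · by_cases hc : cur > 0
        · simp [runsSplit, hx, hc]
        · simp [runsSplit, hx, hc]
    | cons y ys =>
      have hun : runsSplit (x :: y :: ys) cur =
          if x < 0 then runsSplit (y :: ys) (cur + 1)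
          else if cur > 0 then ((runsSplit (y :: ys) 0).1.cons cur, (runsSplit (y :: ys) 0).2)
          else runsSplit (y :: ys) 0 := rfl
      rw [hun]
      rcases hl : (y :: ys).getLast? with _ | w
      · simp [List.getLast?_eq_none_iff] at hl
      · rw [List.getLast?_cons_cons, hl]
        by_cases hx : x < 0
        · rw [if_pos hx, ih (cur + 1) (by omega), hl]
        · by_cases hc : cur > 0
          · rw [if_neg hx, if_pos hc]
            have h0 := ih 0 (by omega)
            rw [hl] at h0
            simpa using h0
          · rw [if_neg hx, if_neg hc, ih 0 (by omega), hl]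

theorem runsSplit_snd_nonneg (dd : List Int) : ∀ cur : Int, 0 ≤ cur → 0 ≤ (runsSplit dd cur).2 := by
  induction dd with
  | nil => intro cur h; simpa [runsSplit]
  | cons x xs ih =>
    intro cur h
    simp only [runsSplit]
    by_cases hx : x < 0
    · simp only [hx, if_pos]; exact ih _ (by omega)
    · by_cases hc : cur > 0
      · simp only [hx, hc, if_pos]; exact ih 0 (by omega)
      · simp only [hx, hc]; exact ih 0 (by omega)

-- ===== VERDICT (by name: the statement is the Claim_ definition above) =====
theorem compute_drawdown_length_spec : Claim_equal_compute_drawdown_length := by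
  intro dd _
  unfold Spec_compute_drawdown_length compute_drawdown_length compute_drawdown_length_alt
  rw [foldl_runsSplit dd [] 0 (by omega), negRuns_eq]
  simp only [List.nil_append]
  set front := (runsSplit dd 0).1 with hf
  set t := (runsSplit dd 0).2 with ht
  have hpos := runsSplit_snd_pos dd 0 (by omega)
  have hnn := runsSplit_snd_nonneg dd 0 (by omega)
  rw [← ht] at hpos hnn
  cases hlast : dd.getLast? with
  | none =>
    have hdd : dd = [] := List.getLast?_eq_none_iff.mp hlast
    subst hdd
    simp [runsSplit] at hf ht
    simp [hf, ht]
  | some v =>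
    have hdd : dd ≠ [] := by
      intro h; subst h; simp at hlast
    have hget : PySem.List.pyGet? dd (-1) = some v := by
      rw [PySem.List.pyGet?_neg_one, hlast]
    rw [hlast] at hpos
    by_cases hv : v < 0
    · -- trailing run exists: t > 0
      have htpos : t > 0 := hpos.mpr hv
      rw [if_pos htpos]
      have hne : front ++ [t] ≠ [] := by simp
      rw [if_neg hne, hget]
      simp only [if_pos hv, List.dropLast_concat]
      by_cases hfe : front = []
      · simp [hfe, htpos]
      · rw [if_neg hfe]
        have : ¬ (front = [] ∧ t > 0) := by tauto
        rw [if_neg this]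
    · -- dd ends nonnegative: t = 0
      have ht0 : ¬ t > 0 := fun h => hv (hpos.mp h)
      rw [if_neg ht0]
      simp only [List.append_nil]
      by_cases hfe : front = []
      · simp [hfe, ht0]
      · rw [if_neg hfe, if_neg (by tauto), hget]
        simp [hv]
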